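-- pv_equiv track=rewrite | github.com/hidevscommunity/gen-ai-apps | Interview-Assistant-without-env-file/screener.py | count_matched_keywords
-- ===== SOURCE A (Python) =====
-- def count_matched_keywords(list1, list2):
--     total_common = 0
--     common = []
--     for keywords1 in list1:
--         for keywords2 in list2:
--             common_keywords = set(keywords1) & set(keywords2)  # Intersection of keyword sets
--             common.append(set(keywords1))
--             total_common += len(common_keywords)
--
--     return total_common,common
-- ===== SOURCE B (Python) =====
-- def count_matched_keywords(list1, list2):
--     # Count, for each keyword, in how many of list2's keyword sets it occurs.
--     occ = {}
--     for keywords2 in list2: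
--         for w in set(keywords2):
--             occ[w] = occ.get(w, 0) + 1
--     m = len(list2)
--     total_common = 0
--     common = []
--     for keywords1 in list1:
--         s1 = set(keywords1)
--         total_common += sum(occ.get(w, 0) for w in s1)
--         common.extend([s1] * m)
--     return total_common, common
-- ===== Notes on version B (the rewrite author's own statement) =====
-- stated objective: faster
-- what changed: Replaces the nested pairwise set-intersection loop by a precomputed per-keyword occurrence counter over list2, so each list1 entry is charged once per keyword instead of once per list2 element; the repeated set(keywords1) entries are emitted with list replication.
import Mathlib
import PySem

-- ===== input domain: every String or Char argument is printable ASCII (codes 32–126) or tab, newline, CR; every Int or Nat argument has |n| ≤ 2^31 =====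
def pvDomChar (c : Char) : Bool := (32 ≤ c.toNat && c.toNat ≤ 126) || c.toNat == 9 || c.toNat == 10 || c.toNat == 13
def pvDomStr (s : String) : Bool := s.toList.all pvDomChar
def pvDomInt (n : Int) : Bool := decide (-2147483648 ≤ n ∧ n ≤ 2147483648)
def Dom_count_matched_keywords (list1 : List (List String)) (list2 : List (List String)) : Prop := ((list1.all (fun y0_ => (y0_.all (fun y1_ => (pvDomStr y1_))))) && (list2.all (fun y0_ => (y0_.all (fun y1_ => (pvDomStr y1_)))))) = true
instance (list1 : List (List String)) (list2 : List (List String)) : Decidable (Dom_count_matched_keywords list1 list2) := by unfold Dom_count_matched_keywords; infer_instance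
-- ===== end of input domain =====

-- B replaces A's pairwise set-intersection double loop by a precomputed per-keyword
-- occurrence counter over list2 (objective: faster, in a timing run's measurement).

-- ===== PORT A =====
-- A: nested loops; for each (keywords1, keywords2) pair append set(keywords1) and add
-- the intersection size.
def count_matched_keywords (list1 : List (List String)) (list2 : List (List String)) : Int × List (List String) :=
  list1.foldl (fun (acc : Int × List (List String)) keywords1 =>
    list2.foldl (fun (acc2 : Int × List (List String)) keywords2 =>
      let common_keywords := PySem.Set.inter (PySem.Set.ofList keywords1) (PySem.Set.ofList keywords2)
      (acc2.1 + (PySem.Set.len common_keywords : Int), acc2.2 ++ [PySem.Set.ofList keywords1]))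
      acc)
    ((0 : Int), ([] : List (List String)))

-- ===== PORT B =====
-- B: occ counts, per keyword, in how many of list2's keyword sets it occurs; then one
-- pass over list1 sums occ over set(keywords1) and replicates that set len(list2) times.
def count_matched_keywords_alt (list1 : List (List String)) (list2 : List (List String)) : Int × List (List String) :=
  let occ : PySem.Dict String Int :=
    list2.foldl (fun d keywords2 =>
      (PySem.Set.ofList keywords2).foldl (fun d w => d.insert w (d.getD w 0 + 1)) d)
      PySem.Dict.empty
  let m := list2.length
  list1.foldl (fun (acc : Int × List (List String)) keywords1 =>
    let s1 := PySem.Set.ofList keywords1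
    (acc.1 + (s1.map (fun w => occ.getD w 0)).sum, acc.2 ++ List.replicate m s1))
    ((0 : Int), ([] : List (List String)))

-- ===== PRECONDITION & SPEC =====
def Spec_count_matched_keywords (list1 : List (List String)) (list2 : List (List String)) (out : Int × List (List String)) : Prop := out = count_matched_keywords_alt list1 list2
instance (list1 : List (List String)) (list2 : List (List String)) (out : Int × List (List String)) : Decidable (Spec_count_matched_keywords list1 list2 out) := by unfold Spec_count_matched_keywords; infer_instance

-- ===== CLAIM (what is proved, stated in full; the proofs are below) =====
def Claim_equal_count_matched_keywords : Prop := ∀ (list1 : List (List String)) (list2 : List (List String)), Dom_count_matched_keywords list1 list2 → Spec_count_matched_keywords list1 list2 (count_matched_keywords list1 list2)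

-- ===== LEMMAS AND PROOFS =====

-- foldl respects extensional equality of the step functions
theorem pv_foldl_ext {α β : Type} (f g : β → α → β) (l : List α) (a : β)
    (h : ∀ b x, f b x = g b x) : l.foldl f a = l.foldl g a := by
  induction l generalizing a with
  | nil => rfl
  | cons x xs ih => simp only [List.foldl_cons, h]; exact ih _

-- A's inner loop in closed form: the sum of intersection sizes and m copies of set(keywords1)
theorem pv_innerA (s1 : List String) (list2 : List (List String)) (t : Int) (c : List (List String)) :
    list2.foldl (fun (acc2 : Int × List (List String)) keywords2 =>
        (acc2.1 + (PySem.Set.len (PySem.Set.inter s1 (PySem.Set.ofList keywords2)) : Int),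
         acc2.2 ++ [s1])) (t, c)
    = (t + (list2.map (fun k2 => (PySem.Set.len (PySem.Set.inter s1 (PySem.Set.ofList k2)) : Int))).sum,
       c ++ List.replicate list2.length s1) := by
  induction list2 generalizing t c with
  | nil => simp
  | cons k2 tl ih =>
    simp only [List.foldl_cons, ih, List.map_cons, List.sum_cons, List.length_cons,
      List.replicate_succ]
    refine Prod.ext (by ring) ?_
    simp [List.append_assoc]

-- the intersection size is a countP over the first set
theorem pv_inter_len (s t : List String) :
    (PySem.Set.len (PySem.Set.inter s t) : Int)
      = (s.countP (fun w => PySem.Set.contains t w) : Int) := by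
  simp [PySem.Set.len, PySem.Set.inter, PySem.Set.contains, List.countP_eq_length_filter]

-- a set's count of an element is 0 or 1 according to membership
theorem pv_count_set (l : List String) (w : String) :
    ((PySem.Set.ofList l).count w : Int)
      = if PySem.Set.contains (PySem.Set.ofList l) w then 1 else 0 := by
  by_cases h : w ∈ PySem.Set.ofList l
  · simp [PySem.Set.contains, h]
  · simp [PySem.Set.contains, h, List.count_eq_zero_of_not_mem h]

-- B's counter dictionary: occ.getD w 0 counts w's occurrences across list2's sets
theorem pv_occ_getD (list2 : List (List String)) (d : PySem.Dict String Int) (w : String) :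
    (list2.foldl (fun d keywords2 =>
        (PySem.Set.ofList keywords2).foldl (fun d w => d.insert w (d.getD w 0 + 1)) d) d).getD w 0
    = d.getD w 0 + (list2.map (fun k2 => ((PySem.Set.ofList k2).count w : Int))).sum := by
  induction list2 generalizing d with
  | nil => simp
  | cons k2 tl ih =>
    simp only [List.foldl_cons, ih, PySem.Dict.getD_foldl_insert_add_one, List.map_cons,
      List.sum_cons]
    ring

-- exchanging a double sum over two lists
theorem pv_sum_comm (l1 : List String) (l2 : List (List String)) (f : String → List String → Int) :
    (l2.map (fun b => (l1.map (fun a => f a b)).sum)).sum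
      = (l1.map (fun a => (l2.map (fun b => f a b)).sum)).sum := by
  induction l1 with
  | nil => simp
  | cons a tl ih =>
    simp only [List.map_cons, List.sum_cons, ← ih, PySem.List.sum_map_add_int]

-- the per-row totals agree: Σ_{k2} |set(k1) ∩ set(k2)| = Σ_{w ∈ set(k1)} occ(w)
theorem pv_row (keywords1 : List String) (list2 : List (List String)) :
    (list2.map (fun k2 =>
        (PySem.Set.len (PySem.Set.inter (PySem.Set.ofList keywords1) (PySem.Set.ofList k2)) : Int))).sum
    = ((PySem.Set.ofList keywords1).map (fun w =>
        (list2.foldl (fun d keywords2 =>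
          (PySem.Set.ofList keywords2).foldl (fun d w => d.insert w (d.getD w 0 + 1)) d)
          PySem.Dict.empty).getD w 0)).sum := by
  have h1 : ∀ k2 : List String,
      (PySem.Set.len (PySem.Set.inter (PySem.Set.ofList keywords1) (PySem.Set.ofList k2)) : Int)
        = ((PySem.Set.ofList keywords1).map (fun w =>
            ((PySem.Set.ofList k2).count w : Int))).sum := by
    intro k2
    rw [pv_inter_len, ← PySem.List.sum_map_ite_one_zero]
    exact congrArg List.sum (List.map_congr_left (fun w _ => (pv_count_set k2 w).symm))
  calc (list2.map (fun k2 =>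
        (PySem.Set.len (PySem.Set.inter (PySem.Set.ofList keywords1) (PySem.Set.ofList k2)) : Int))).sum
      = (list2.map (fun k2 => ((PySem.Set.ofList keywords1).map (fun w =>
          ((PySem.Set.ofList k2).count w : Int))).sum)).sum := by
        exact congrArg List.sum (List.map_congr_left (fun k2 _ => h1 k2))
    _ = ((PySem.Set.ofList keywords1).map (fun w =>
          (list2.map (fun k2 => ((PySem.Set.ofList k2).count w : Int))).sum)).sum :=
        pv_sum_comm _ _ _
    _ = _ := by
        refine congrArg List.sum (List.map_congr_left (fun w _ => ?_))
        rw [pv_occ_getD]; simp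

-- ===== VERDICT (by name: the statement is the Claim_ definition above) =====
theorem count_matched_keywords_spec : Claim_equal_count_matched_keywords := by
  intro list1 list2 _
  unfold Spec_count_matched_keywords count_matched_keywords count_matched_keywords_alt
  refine pv_foldl_ext _ _ _ _ ?_
  intro acc keywords1
  rw [show acc = (acc.1, acc.2) from rfl, pv_innerA, pv_row]
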